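-- pv_equiv track=rewrite | github.com/hongxing1986/- | pattern_library_v2.py | s7
-- ===== SOURCE A (Python) =====
-- from collections import Counter, defaultdict
--
-- def s7(train):  # 近5热+不在上期
--     last = set(train[-1]['zs'])
--     c = Counter()
--     for d in train[-5:]: c.update(d['zs'])
--     for z,_ in c.most_common():
--         if z not in last:
--             return z
--     return c.most_common(1)[0][0]
-- ===== SOURCE B (Python) =====
-- def s7(train):  # flatten, dedup in first-seen order, pick max by count; no Counter, no sort
--     last = set(train[-1]['zs'])
--     nums = [z for d in train[-5:] for z in d['zs']]
--     seen = list(dict.fromkeys(nums))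
--     absent = [z for z in seen if z not in last]
--     return max(absent or seen, key=nums.count)
-- ===== Notes on version B (the rewrite author's own statement) =====
-- stated objective: simpler
-- what changed: Drops Counter and most_common() entirely: B flattens the last five draws into one list, dedups it in first-seen order via dict.fromkeys, filters out last-draw numbers, and returns max(absent or seen, key=nums.count) - max's first-maximum rule reproduces most_common's stable tie-breaking without building or sorting a frequency table.
import Mathlib
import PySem

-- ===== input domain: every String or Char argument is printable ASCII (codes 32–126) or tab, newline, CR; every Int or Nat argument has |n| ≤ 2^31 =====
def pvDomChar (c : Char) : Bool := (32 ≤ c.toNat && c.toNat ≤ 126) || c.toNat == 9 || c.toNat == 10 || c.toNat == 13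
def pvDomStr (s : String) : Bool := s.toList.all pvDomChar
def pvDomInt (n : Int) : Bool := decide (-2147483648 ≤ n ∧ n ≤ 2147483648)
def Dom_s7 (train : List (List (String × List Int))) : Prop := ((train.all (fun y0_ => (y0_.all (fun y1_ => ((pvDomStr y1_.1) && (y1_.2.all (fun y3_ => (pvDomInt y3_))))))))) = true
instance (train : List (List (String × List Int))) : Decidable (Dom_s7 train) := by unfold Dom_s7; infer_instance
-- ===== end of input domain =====

-- B drops the Counter and most_common() entirely: it flattens the last five draws, dedups in
-- first-seen order, and takes max(…, key=nums.count); equality is about the RETURN value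
-- (neither program mutates its input).

-- ===== PORT A =====
-- the 'for z,_ in c.most_common(): if z not in last: return z' loop
def s7Scan (last : PySem.Set Int) : List (Int × Int) → Option Int
  | [] => none
  | (z, _) :: t => if PySem.Set.contains last z then s7Scan last t else some z

def s7 (train : List (List (String × List Int))) : Int :=
  match PySem.List.pyGet? train (-1) with
  | none => 0  -- IndexError (empty train): excluded by Pre_s7
  | some lastd =>
    match (PySem.Dict.mk lastd).get? "zs" with
    | none => 0  -- KeyError: excluded by Pre_s7
    | some lzs =>
      let last := PySem.Set.ofList lzs
      let c := (PySem.List.slice train (some (-5)) none).foldl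
        (fun c d => ((PySem.Dict.mk d).getD "zs" []).foldl
          (fun c z => c.modify z (0 : Int) (· + 1)) c)
        PySem.Dict.empty
      let s := PySem.List.sorted c.items (fun p => p.2) true  -- c.most_common()
      match s7Scan last s with
      | some z => z
      | none =>
        match PySem.List.pyGet? s 0 with  -- c.most_common(1)[0]
        | some q => q.1
        | none => 0  -- IndexError (empty Counter): excluded by Pre_s7

-- ===== PORT B =====
def s7_alt (train : List (List (String × List Int))) : Int :=
  match PySem.List.pyGet? train (-1) with
  | none => 0  -- IndexError (empty train): excluded by Pre_s7
  | some lastd =>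
    match (PySem.Dict.mk lastd).get? "zs" with
    | none => 0  -- KeyError: excluded by Pre_s7
    | some lzs =>
      let last := PySem.Set.ofList lzs
      let nums := (PySem.List.slice train (some (-5)) none).flatMap
        (fun d => (PySem.Dict.mk d).getD "zs" [])          -- the flattening comprehension
      let seen := PySem.List.dedup nums                     -- list(dict.fromkeys(nums))
      let absent := seen.filter (fun z => !(PySem.Set.contains last z))
      match PySem.List.max? (if absent.isEmpty then seen else absent)
              (fun z => nums.count z) with                  -- max(absent or seen, key=nums.count)
      | some z => z
      | none => 0  -- ValueError: max() of an empty sequence: excluded by Pre_s7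

-- ===== PRECONDITION & SPEC =====
-- Pre_s7 excludes exactly the inputs where the Python A raises: an empty train (IndexError),
-- a draw in train[-5:] without the 'zs' key (KeyError), and an empty Counter, i.e. all 'zs'
-- lists in train[-5:] empty (IndexError from most_common(1)[0]; B's max() raises there too).
def Pre_s7 (train : List (List (String × List Int))) : Prop :=
  train ≠ [] ∧
  (∀ d ∈ PySem.List.slice train (some (-5)) none, (PySem.Dict.mk d).contains "zs" = true) ∧
  (∃ d ∈ PySem.List.slice train (some (-5)) none, (PySem.Dict.mk d).getD "zs" [] ≠ [])
instance (train : List (List (String × List Int))) : Decidable (Pre_s7 train) := by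
  unfold Pre_s7; infer_instance

def pvWitness_s7 : (List (List (String × List Int))) :=
  [[("zs", [1, 2]), ("x", [3])], [("zs", [2])]]

def Spec_s7 (train : List (List (String × List Int))) (out : Int) : Prop := out = s7_alt train
instance (train : List (List (String × List Int))) (out : Int) : Decidable (Spec_s7 train out) := by
  unfold Spec_s7; infer_instance

-- ===== CLAIM (what is proved, stated in full; the proofs are below) =====
def Claim_equal_s7 : Prop := ∀ (train : List (List (String × List Int))), Dom_s7 train → Pre_s7 train → Spec_s7 train (s7 train)

-- ===== LEMMAS AND PROOFS =====

-- the strict-greater running max on (key, count) pairs that sorted-then-scan reduces to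
def s7Upd (a : Option (Int × Int)) (p : Int × Int) : Option (Int × Int) :=
  match a with
  | none => some p
  | some q => if q.2 < p.2 then some p else some q

lemma s7Scan_eq_find? (last : PySem.Set Int) (s : List (Int × Int)) :
    s7Scan last s = (s.find? (fun p => !(PySem.Set.contains last p.1))).map (·.1) := by
  induction s with
  | nil => rfl
  | cons p t ih =>
    cases p with
    | mk z n =>
      by_cases h : z ∈ last <;>
        simp [s7Scan, List.find?, h, ih]

lemma find?_insertBy (pred : Int × Int → Bool) (x : Int × Int) (s : List (Int × Int))
    (hs : s.Pairwise (fun a b => b.2 ≤ a.2)) :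
    (PySem.List.insertBy (fun a b => decide (b.2 < a.2)) x s).find? pred =
      if pred x then s7Upd (s.find? pred) x else s.find? pred := by
  induction s with
  | nil =>
    cases hpx : pred x <;> simp [PySem.List.insertBy, List.find?, hpx, s7Upd]
  | cons y t ih =>
    have hy : ∀ z ∈ t, z.2 ≤ y.2 := (List.pairwise_cons.mp hs).1
    have ht : t.Pairwise (fun a b => b.2 ≤ a.2) := (List.pairwise_cons.mp hs).2
    by_cases hlt : y.2 < x.2
    · have h1 : PySem.List.insertBy (fun a b => decide (b.2 < a.2)) x (y :: t) = x :: y :: t := by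
        simp [PySem.List.insertBy, hlt]
      rw [h1]
      cases hpx : pred x with
      | false =>
        have l1 : List.find? pred (x :: y :: t) = List.find? pred (y :: t) :=
          List.find?_cons_of_neg (by simp [hpx])
        simp [l1]
      | true =>
        have l1 : List.find? pred (x :: y :: t) = some x :=
          List.find?_cons_of_pos (by simp [hpx])
        rw [l1, if_pos rfl]
        cases hf : (y :: t).find? pred with
        | none => simp [s7Upd]
        | some q =>
          have hq : q ∈ y :: t := List.mem_of_find?_eq_some hf
          have hql : q.2 ≤ y.2 := by
            rcases List.mem_cons.mp hq with h | h
            · simp [h]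
            · exact hy q h
          have hq2 : q.2 < x.2 := lt_of_le_of_lt hql hlt
          simp [s7Upd, hq2]
    · have h1 : PySem.List.insertBy (fun a b => decide (b.2 < a.2)) x (y :: t) =
          y :: PySem.List.insertBy (fun a b => decide (b.2 < a.2)) x t := by
        simp [PySem.List.insertBy, hlt]
      rw [h1]
      cases hpy : pred y
      · simp only [List.find?, hpy]
        exact ih ht
      · cases hpx : pred x <;>
          simp [List.find?, hpy, s7Upd, hlt]

lemma find?_sorted_rev (pred : Int × Int → Bool) (l : List (Int × Int)) :
    (PySem.List.sorted l (fun p => p.2) true).find? pred = (l.filter pred).foldl s7Upd none := by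
  induction l using List.reverseRecOn with
  | nil => rfl
  | append_singleton l x ih =>
    rw [PySem.List.sorted_rev_eq_foldl_insertBy, List.foldl_append,
        ← PySem.List.sorted_rev_eq_foldl_insertBy]
    simp only [List.foldl_cons, List.foldl_nil]
    rw [find?_insertBy pred x _ (PySem.List.sorted_pairwise_rev l (fun p => p.2)), ih]
    rw [List.filter_append]
    cases hpx : pred x <;> simp [hpx]

lemma head?_eq_find?_true (s : List (Int × Int)) :
    s.head? = s.find? (fun _ => true) := by
  cases s <;> simp [List.find?]

lemma pyGet?_zero (s : List (Int × Int)) : PySem.List.pyGet? s 0 = s.head? := by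
  cases s <;> simp [PySem.List.pyGet?, PySem.List.pyIdx?]

-- max?'s fold body, named so the B-side fold can be reasoned about uniformly
def s7Step (c : Int → Nat) (acc : Option Int) (x : Int) : Option Int :=
  match acc with
  | none => some x
  | some m => if c m < c x then some x else some m

lemma max?_eq_foldl_step (c : Int → Nat) (l : List Int) :
    PySem.List.max? l c = l.foldl (s7Step c) none := by
  simp only [PySem.List.max?]
  congr 1
  funext acc x
  cases acc <;> rfl

-- the s7Upd fold over (k, count k) pairs IS max? with key = count, transported along the pairing
lemma foldl_upd_map (c : Int → Nat) (l : List Int) (a : Option Int) :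
    (l.map (fun k => (k, (c k : Int)))).foldl s7Upd (a.map (fun k => (k, (c k : Int)))) =
      (l.foldl (s7Step c) a).map (fun k => (k, (c k : Int))) := by
  induction l generalizing a with
  | nil => rfl
  | cons x t ih =>
    cases a with
    | none =>
      simpa [s7Step] using ih (some x)
    | some m =>
      by_cases h : c m < c x
      · simpa [s7Upd, s7Step, h] using ih (some x)
      · simpa [s7Upd, s7Step, h] using ih (some m)

lemma foldl_upd_map_none (c : Int → Nat) (l : List Int) :
    (l.map (fun k => (k, (c k : Int)))).foldl s7Upd none =
      (PySem.List.max? l c).map (fun k => (k, (c k : Int))) := by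
  rw [max?_eq_foldl_step]
  simpa using foldl_upd_map c l none

lemma foldl_step_some_ne_none (c : Int → Nat) (t : List Int) :
    ∀ m : Int, t.foldl (s7Step c) (some m) ≠ none := by
  induction t with
  | nil => intro m; simp
  | cons y t ih =>
    intro m
    by_cases h : c m < c y <;> simp [s7Step, h, ih]

lemma max?_nil (c : Int → Nat) : PySem.List.max? ([] : List Int) c = none := rfl

lemma max?_cons_ne_none (c : Int → Nat) (x : Int) (t : List Int) :
    PySem.List.max? (x :: t) c ≠ none := by
  rw [max?_eq_foldl_step]
  simpa [s7Step] using foldl_step_some_ne_none c t x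

-- ===== VERDICT (by name: the statement is the Claim_ definition above) =====
theorem s7_spec : Claim_equal_s7 := by
  intro train _ _
  unfold Spec_s7 s7 s7_alt
  cases PySem.List.pyGet? train (-1) with
  | none => rfl
  | some lastd =>
    dsimp only
    cases (PySem.Dict.mk lastd).get? "zs" with
    | none => rfl
    | some lzs =>
      dsimp only
      -- A's Counter loop is the counter of the flattened number stream
      rw [show ((PySem.List.slice train (some (-5)) none).foldl
            (fun c d => ((PySem.Dict.mk d).getD "zs" []).foldl
              (fun c z => c.modify z (0 : Int) (· + 1)) c)
            PySem.Dict.empty)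
          = PySem.Dict.counter
              ((PySem.List.slice train (some (-5)) none).flatMap
                (fun d => (PySem.Dict.mk d).getD "zs" [])) from by
        rw [← PySem.Dict.foldl_insert_getD_add_one_eq_counter, ← List.foldl_flatMap]
        rfl]
      set nums := (PySem.List.slice train (some (-5)) none).flatMap
        (fun d => (PySem.Dict.mk d).getD "zs" []) with hnums
      set last := PySem.Set.ofList lzs with hlast
      set c : Int → Nat := fun k => nums.count k with hc
      have hitems : (PySem.Dict.counter nums).items =
          (PySem.List.dedup nums).map (fun k => (k, (c k : Int))) := by
        simpa [PySem.List.dedup, hc] using PySem.Dict.items_counter nums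
      rw [s7Scan_eq_find?, find?_sorted_rev, pyGet?_zero, head?_eq_find?_true,
          find?_sorted_rev (fun _ => true), hitems]
      rw [List.filter_map, List.filter_true]
      simp only [Function.comp_def]
      rw [foldl_upd_map_none c, foldl_upd_map_none c]
      cases habs : (PySem.List.dedup nums).filter (fun z => !(PySem.Set.contains last z)) with
      | nil =>
        simp only [List.isEmpty_nil, if_true]
        cases hm : PySem.List.max? (PySem.List.dedup nums) c <;>
          simp [max?_nil]
      | cons x t =>
        simp only [List.isEmpty_cons, Bool.false_eq_true, if_false]
        cases hm : PySem.List.max? (x :: t) c with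
        | none => exact absurd hm (max?_cons_ne_none c x t)
        | some z => simp
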